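-- pv_equiv track=rewrite | github.com/abyanji/py_seminar06 | Tasks.py | friendlynumbers
-- ===== SOURCE A (Python) =====
-- def friendlynumbers(k):
--     d = {}
--     for i in range(1, k):
--         summa = 0
--         for j in range(1, k // 2 + 1):
--             if j >= i:
--                 break
--             elif i % j == 0:
--                 summa += j
--         if summa < k:
--             d[i] = summa
--     return d
-- ===== SOURCE B (Python) =====
-- def friendlynumbers(k):
--     # Divisor-sum sieve: each j adds itself to all proper multiples, O(k log k).
--     s = [0] * k
--     for j in range(1, k):
--         for m in range(2 * j, k, j):
--             s[m] += j
--     return {i: s[i] for i in range(1, k) if s[i] < k}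
-- ===== Notes on version B (the rewrite author's own statement) =====
-- stated objective: faster
-- what changed: Replaces A's per-number trial division (scanning all candidate divisors up to half of k for every i) with a single divisor-sum sieve that adds each j to all of its proper multiples, then reads the table.
import Mathlib
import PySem

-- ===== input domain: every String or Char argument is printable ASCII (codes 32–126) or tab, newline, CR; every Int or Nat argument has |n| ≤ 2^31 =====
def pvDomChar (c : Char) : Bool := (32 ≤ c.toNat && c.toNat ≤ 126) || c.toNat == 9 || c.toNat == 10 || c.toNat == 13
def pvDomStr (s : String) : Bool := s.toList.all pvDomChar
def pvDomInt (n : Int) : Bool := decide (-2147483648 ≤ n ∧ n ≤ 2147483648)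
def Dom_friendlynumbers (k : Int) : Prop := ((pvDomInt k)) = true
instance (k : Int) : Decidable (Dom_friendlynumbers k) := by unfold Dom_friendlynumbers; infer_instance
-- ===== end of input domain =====

-- B replaces A's quadratic per-i trial division by a divisor-sum sieve (each j adds itself
-- to all of its proper multiples once), an asymptotically faster different algorithm.

-- ===== PORT A =====
-- inner loop 'for j in range(1, k//2+1): if j >= i: break; elif i % j == 0: summa += j'
def pvInnerA (i : Int) : List Int → Int → Int
  | [], summa => summa
  | j :: rest, summa =>
    if j ≥ i then summa
    else if PySem.Int.mod i j = 0 then pvInnerA i rest (summa + j)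
    else pvInnerA i rest summa

def friendlynumbers (k : Int) : List (Int × Int) :=
  ((PySem.List.pyRange 1 k 1).foldl (fun d i =>
      let summa := pvInnerA i (PySem.List.pyRange 1 (PySem.Int.floordiv k 2 + 1) 1) 0
      if summa < k then d.insert i summa else d)
    (PySem.Dict.empty : PySem.Dict Int Int)).items

-- ===== PORT B =====
-- s = [0]*k; for j in range(1,k): for m in range(2*j, k, j): s[m] += j
def pvSieve (k : Int) : List Int :=
  (PySem.List.pyRange 1 k 1).foldl (fun s j =>
      (PySem.List.pyRange (2 * j) k j).foldl
        (fun s m => s.set m.toNat (PySem.List.pyGetD s m 0 + j)) s)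
    (List.replicate k.toNat 0)

-- {i: s[i] for i in range(1, k) if s[i] < k}
def friendlynumbers_alt (k : Int) : List (Int × Int) :=
  ((PySem.List.pyRange 1 k 1).foldl (fun d i =>
      if PySem.List.pyGetD (pvSieve k) i 0 < k then d.insert i (PySem.List.pyGetD (pvSieve k) i 0) else d)
    (PySem.Dict.empty : PySem.Dict Int Int)).items

-- ===== PRECONDITION & SPEC =====
def Spec_friendlynumbers (k : Int) (out : List (Int × Int)) : Prop := out = friendlynumbers_alt k
instance (k : Int) (out : List (Int × Int)) : Decidable (Spec_friendlynumbers k out) := by unfold Spec_friendlynumbers; infer_instance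

-- ===== CLAIM (what is proved, stated in full; the proofs are below) =====
def Claim_equal_friendlynumbers : Prop := ∀ (k : Int), Dom_friendlynumbers k → Spec_friendlynumbers k (friendlynumbers k)

-- ===== LEMMAS AND PROOFS =====

-- a proper divisor (1 ≤ j < i, j ∣ i) is at most half of i
lemma pvDvdHalf {i j : Int} (hj : 1 ≤ j) (hji : j < i) (hd : j ∣ i) : 2 * j ≤ i := by
  obtain ⟨c, hc⟩ := hd
  have hc2 : 2 ≤ c := by nlinarith
  nlinarith

lemma pvNodupPyRange {a b s : Int} (hs : 0 < s) : (PySem.List.pyRange a b s).Nodup := by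
  rw [PySem.List.pyRange_of_pos a b hs]
  refine List.Nodup.map ?_ List.nodup_range
  intro x y h
  have := mul_left_cancel₀ (ne_of_gt hs) (by linarith : s * (x : Int) = s * (y : Int))
  exact_mod_cast this

-- the inner update loop of the sieve preserves the length of s
lemma pvUpdLength (j : Int) (L : List Int) : ∀ (s : List Int),
    (L.foldl (fun s m => s.set m.toNat (PySem.List.pyGetD s m 0 + j)) s).length = s.length := by
  induction L with
  | nil => intro s; rfl
  | cons m L ih => intro s; simp [List.foldl_cons, ih]

-- the inner update loop adds j to every in-range cell listed in L, once per occurrence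
lemma pvUpdGetD (j : Int) (L : List Int) : ∀ (s : List Int),
    (∀ m ∈ L, 0 ≤ m ∧ m.toNat < s.length) → ∀ (i : Int), 0 ≤ i →
    PySem.List.pyGetD (L.foldl (fun s m => s.set m.toNat (PySem.List.pyGetD s m 0 + j)) s) i 0
      = PySem.List.pyGetD s i 0 + (L.count i : Int) * j := by
  induction L with
  | nil => intro s _ i _; simp
  | cons m L ih =>
    intro s hm i hi
    obtain ⟨hm0, hmlen⟩ := hm m (by simp)
    have hrest : ∀ x ∈ L, 0 ≤ x ∧ x.toNat < (s.set m.toNat (PySem.List.pyGetD s m 0 + j)).length := by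
      intro x hx; simpa using hm x (by simp [hx])
    rw [List.foldl_cons, ih _ hrest i hi]
    rw [PySem.List.pyGetD_of_nonneg _ _ hi, PySem.List.pyGetD_of_nonneg _ _ hi,
        PySem.List.pyGetD_of_nonneg _ _ hm0]
    by_cases hmi : m = i
    · subst hmi
      rw [List.getD_eq_getElem?_getD, List.getElem?_set_self (by omega), List.count_cons_self]
      simp only [List.getD_eq_getElem?_getD, Option.getD_some]
      push_cast
      ring
    · have hne : m.toNat ≠ i.toNat := by omega
      rw [List.getD_eq_getElem?_getD, List.getElem?_set_ne hne, ← List.getD_eq_getElem?_getD]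
      simp [List.count_cons]
      exact Or.inl hmi

-- value of the full sieve loop at cell i
lemma pvSieveFold (k : Int) (J : List Int) : ∀ (s : List Int), s.length = k.toNat →
    (∀ j ∈ J, 0 < j) → ∀ (i : Int), 0 ≤ i →
    PySem.List.pyGetD (J.foldl (fun s j =>
        (PySem.List.pyRange (2 * j) k j).foldl
          (fun s m => s.set m.toNat (PySem.List.pyGetD s m 0 + j)) s) s) i 0
      = PySem.List.pyGetD s i 0
        + (J.map (fun j => if 2 * j ≤ i ∧ i < k ∧ j ∣ i then j else 0)).sum := by
  induction J with
  | nil => intro s _ _ i _; simp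
  | cons j J ih =>
    intro s hs hJ i hi
    have hj : 0 < j := hJ j (by simp)
    have hmemL : ∀ m ∈ PySem.List.pyRange (2 * j) k j, 0 ≤ m ∧ m.toNat < s.length := by
      intro m hm
      have := (PySem.List.mem_pyRange_iff_of_pos hj m).mp hm
      refine ⟨by omega, by rw [hs]; omega⟩
    rw [List.foldl_cons, ih _ (by rw [pvUpdLength, hs]) (fun x hx => hJ x (by simp [hx])) i hi,
        pvUpdGetD j _ s hmemL i hi]
    have hcount : (List.count i (PySem.List.pyRange (2 * j) k j) : Int) * j
        = (if 2 * j ≤ i ∧ i < k ∧ j ∣ i then j else 0) := by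
      by_cases hmem : i ∈ PySem.List.pyRange (2 * j) k j
      · have hc := List.count_eq_one_of_mem (pvNodupPyRange hj) hmem
        have h3 := (PySem.List.mem_pyRange_iff_of_pos hj i).mp hmem
        have hdvd : j ∣ i := by simpa using h3.2.2.add (dvd_mul_left j 2)
        rw [hc, if_pos ⟨h3.1, h3.2.1, hdvd⟩]; ring
      · rw [List.count_eq_zero_of_not_mem hmem, if_neg ?_]
        · simp
        · rintro ⟨ha, hb, hc⟩
          exact hmem ((PySem.List.mem_pyRange_iff_of_pos hj i).mpr
            ⟨ha, hb, dvd_sub hc (dvd_mul_left j 2)⟩)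
    rw [hcount]
    simp only [List.map_cons, List.sum_cons]
    ring

-- A's inner loop without a break is a divisor sum
lemma pvInnerANoBreak (i : Int) (L : List Int) : ∀ (summa : Int), (∀ j ∈ L, j < i) →
    pvInnerA i L summa = summa + (L.map (fun j => if j ∣ i then j else 0)).sum := by
  induction L with
  | nil => intro summa _; simp [pvInnerA]
  | cons j L ih =>
    intro summa h
    have hj : j < i := h j (by simp)
    rw [pvInnerA, if_neg (by omega)]
    by_cases hd : j ∣ i
    · rw [if_pos ((PySem.Int.mod_eq_zero_iff_dvd i j).mpr hd),
          ih _ (fun x hx => h x (by simp [hx]))]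
      simp [if_pos hd]; ring
    · rw [if_neg (fun hc => hd ((PySem.Int.mod_eq_zero_iff_dvd i j).mp hc)),
          ih _ (fun x hx => h x (by simp [hx]))]
      simp [if_neg hd]

lemma pvInnerABreak (i j : Int) (L2 : List Int) (hij : i ≤ j) : ∀ (L1 : List Int) (summa : Int),
    (∀ x ∈ L1, x < i) →
    pvInnerA i (L1 ++ j :: L2) summa = pvInnerA i L1 summa := by
  intro L1
  induction L1 with
  | nil => intro summa _; simp [pvInnerA, if_pos (by omega : j ≥ i)]
  | cons x L1 ih =>
    intro summa h
    have hx : x < i := h x (by simp)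
    simp only [List.cons_append, pvInnerA, if_neg (by omega : ¬ x ≥ i)]
    split <;> exact ih _ (fun y hy => h y (by simp [hy]))

-- the per-index agreement: A's inner-loop sum equals the sieve cell
lemma pvPoint (k i : Int) (h1 : 1 ≤ i) (h2 : i < k) :
    pvInnerA i (PySem.List.pyRange 1 (PySem.Int.floordiv k 2 + 1) 1) 0
      = PySem.List.pyGetD (pvSieve k) i 0 := by
  have hk2 : 2 ≤ k := by omega
  set K : Int := PySem.Int.floordiv k 2 + 1 with hK
  have hbr : ∀ q : Int, q ≤ PySem.Int.floordiv k 2 ↔ q * 2 ≤ k :=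
    fun q => PySem.Int.le_floordiv_iff_mul_le (by norm_num)
  have hK1 : 2 ≤ K := by have := (hbr 1).mpr (by omega); omega
  have hR : PySem.List.pyGetD (pvSieve k) i 0
      = ((PySem.List.pyRange 1 k 1).map (fun j => if 2 * j ≤ i ∧ i < k ∧ j ∣ i then j else 0)).sum := by
    rw [pvSieve, pvSieveFold k _ _ (by simp) (fun j hj => by
          have := (PySem.List.mem_pyRange_one).mp hj; omega) i (by omega)]
    have h0 : PySem.List.pyGetD (List.replicate k.toNat (0:Int)) i 0 = 0 := by
      rw [PySem.List.pyGetD_of_nonneg _ _ (by omega)]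
      simp [List.getD_eq_getElem?_getD]
    rw [h0, zero_add]
  set m : Int := min i K with hm
  have hm1 : 1 ≤ m := by omega
  have hL : pvInnerA i (PySem.List.pyRange 1 K 1) 0
      = ((PySem.List.pyRange 1 m 1).map (fun j => if j ∣ i then j else 0)).sum := by
    by_cases hiK : i < K
    · have hmi : m = i := by omega
      rw [PySem.List.pyRange_one_append 1 i K (by omega) (by omega),
          PySem.List.pyRange_one_cons hiK,
          pvInnerABreak i i _ (le_refl i) _ 0 (fun x hx => by
            have := (PySem.List.mem_pyRange_one).mp hx; omega),
          pvInnerANoBreak i _ 0 (fun x hx => by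
            have := (PySem.List.mem_pyRange_one).mp hx; omega), zero_add, hmi]
    · rw [pvInnerANoBreak i _ 0 (fun x hx => by
            have := (PySem.List.mem_pyRange_one).mp hx; omega), zero_add]
      have hmK : m = K := by omega
      rw [hmK]
  rw [hL, hR]
  rw [PySem.List.pyRange_one_append 1 m k (by omega) (by omega), List.map_append, List.sum_append]
  have htail : ((PySem.List.pyRange m k 1).map
      (fun j => if 2 * j ≤ i ∧ i < k ∧ j ∣ i then j else 0)).sum = 0 := by
    apply List.sum_eq_zero
    intro x hx
    simp only [List.mem_map] at hx
    obtain ⟨j, hj, rfl⟩ := hx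
    have hjm := (PySem.List.mem_pyRange_one).mp hj
    rw [if_neg]
    rintro ⟨ha, hb, hc⟩
    have hjK : j < K := by have := (hbr j).mpr (by omega); omega
    omega
  rw [htail, add_zero]
  refine congrArg List.sum (List.map_congr_left ?_)
  intro j hj
  have hjm := (PySem.List.mem_pyRange_one).mp hj
  by_cases hd : j ∣ i
  · rw [if_pos hd, if_pos ⟨pvDvdHalf (by omega) (by omega) hd, h2, hd⟩]
  · rw [if_neg hd, if_neg (fun h => hd h.2.2)]

-- ===== VERDICT (by name: the statement is the Claim_ definition above) =====
theorem friendlynumbers_spec : Claim_equal_friendlynumbers := by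
  intro k _
  unfold Spec_friendlynumbers friendlynumbers friendlynumbers_alt
  congr 1
  apply PySem.List.foldl_congr_mem
  intro d i hi
  have hmem := (PySem.List.mem_pyRange_one).mp hi
  rw [pvPoint k i (by omega) (by omega)]
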